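-- pv_equiv track=rewrite | github.com/RunOnYourOwn/TurfTrack | backend/app/api/v1/endpoints/data_health.py | find_missing_ranges
-- ===== SOURCE A (Python) =====
-- def find_missing_ranges(present_dates, expected_dates):
--     missing = []
--     current_range = []
--     for d in expected_dates:
--         if d not in present_dates:
--             if not current_range:
--                 current_range = [d, d]
--             else:
--                 current_range[1] = d
--         else:
--             if current_range:
--                 missing.append(
--                     {"start": str(current_range[0]), "end": str(current_range[1])}
--                 )
--                 current_range = []
--     if current_range:
--         missing.append({"start": str(current_range[0]), "end": str(current_range[1])})
--     return missing
-- ===== SOURCE B (Python) =====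
-- def _missing_run_end(present, dates, j, n):
--     # scan forward over the run of missing dates starting at j; return one past its end
--     while j < n and dates[j] not in present:
--         j += 1
--     return j
--
-- def find_missing_ranges(present_dates, expected_dates):
--     present = set(present_dates)
--     missing = []
--     i, n = 0, len(expected_dates)
--     while i < n:
--         d = expected_dates[i]
--         i += 1
--         if d not in present:
--             j = _missing_run_end(present, expected_dates, i, n)
--             last = expected_dates[j - 1] if j > i else d
--             missing.append({"start": str(d), "end": str(last)})
--             i = j
--     return missing
-- ===== Notes on version B (the rewrite author's own statement) =====
-- stated objective: alternative
-- what changed: B builds a set of present dates once and scans expected_dates by spanning whole missing runs (partition-then-summarize), instead of A's per-element open/close current_range state with a list membership test inside the loop.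
import Mathlib
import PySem

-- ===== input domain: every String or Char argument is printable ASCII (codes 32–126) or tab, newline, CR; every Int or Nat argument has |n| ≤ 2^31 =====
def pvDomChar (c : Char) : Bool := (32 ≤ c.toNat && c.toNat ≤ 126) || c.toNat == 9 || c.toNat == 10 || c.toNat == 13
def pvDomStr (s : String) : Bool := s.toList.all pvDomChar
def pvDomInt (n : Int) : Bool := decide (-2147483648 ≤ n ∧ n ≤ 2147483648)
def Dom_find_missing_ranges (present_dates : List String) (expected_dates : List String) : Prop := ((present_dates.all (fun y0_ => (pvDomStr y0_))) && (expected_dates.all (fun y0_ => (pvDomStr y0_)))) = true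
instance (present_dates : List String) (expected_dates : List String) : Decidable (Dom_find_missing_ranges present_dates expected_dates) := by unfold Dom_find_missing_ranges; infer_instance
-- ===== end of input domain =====

-- B replaces A's per-element open/close current_range state by a set of present dates plus
-- a run-spanning scan of expected_dates (alternative decomposition: partition-then-summarize).


-- ===== PORT A =====
-- A's loop state: (missing so far, current_range as an optional (start, end) pair)
def fmrStepA (present_dates : List String) (st : List (List (String × String)) × Option (String × String)) (d : String) : List (List (String × String)) × Option (String × String) :=
  if present_dates.contains d then
    match st.2 with
    | some r => (st.1 ++ [[("start", r.1), ("end", r.2)]], none)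
    | none => st
  else
    match st.2 with
    | none => (st.1, some (d, d))
    | some r => (st.1, some (r.1, d))

-- the trailing 'if current_range: missing.append(...)'
def fmrFinishA (st : List (List (String × String)) × Option (String × String)) : List (List (String × String)) :=
  match st.2 with
  | some r => st.1 ++ [[("start", r.1), ("end", r.2)]]
  | none => st.1

def find_missing_ranges (present_dates : List String) (expected_dates : List String) : List (List (String × String)) :=
  fmrFinishA (expected_dates.foldl (fmrStepA present_dates) ([], none))

-- ===== PORT B =====
-- _missing_run_end as a span: the all-missing run (elements before j) and the remainder (from j)
def fmrSpan (present : PySem.Set String) (dates : List String) : List String × List String :=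
  (dates.takeWhile (fun x => !(PySem.Set.contains present x)),
   dates.dropWhile (fun x => !(PySem.Set.contains present x)))

def fmrGoB (present : PySem.Set String) : List String → List (List (String × String))
  | [] => []
  | d :: rest =>
    if PySem.Set.contains present d then fmrGoB present rest
    else
      let sp := fmrSpan present rest
      [("start", d), ("end", sp.1.getLast?.getD d)] :: fmrGoB present sp.2
termination_by l => l.length
decreasing_by
  · simp
  · simp only [fmrSpan]
    exact Nat.lt_succ_of_le (List.length_dropWhile_le _ rest)

def find_missing_ranges_alt (present_dates : List String) (expected_dates : List String) : List (List (String × String)) :=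
  fmrGoB (PySem.Set.ofList present_dates) expected_dates

-- ===== PRECONDITION & SPEC =====
def Spec_find_missing_ranges (present_dates : List String) (expected_dates : List String) (out : List (List (String × String))) : Prop := out = find_missing_ranges_alt present_dates expected_dates
instance (present_dates : List String) (expected_dates : List String) (out : List (List (String × String))) : Decidable (Spec_find_missing_ranges present_dates expected_dates out) := by unfold Spec_find_missing_ranges; infer_instance

-- ===== CLAIM (what is proved, stated in full; the proofs are below) =====
def Claim_equal_find_missing_ranges : Prop := ∀ (present_dates : List String) (expected_dates : List String), Dom_find_missing_ranges present_dates expected_dates → Spec_find_missing_ranges present_dates expected_dates (find_missing_ranges present_dates expected_dates)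

-- ===== LEMMAS AND PROOFS =====

-- set(present_dates) membership agrees with A's list membership
theorem fmrContainsOfList (p : List String) (x : String) :
    PySem.Set.contains (PySem.Set.ofList p) x = decide (x ∈ p) := by
  by_cases h : x ∈ p
  · have h1 : x ∈ PySem.Set.ofList p := (PySem.Set.mem_ofList p x).mpr h
    simp_all [PySem.Set.contains_eq_listContains]
  · have h1 : x ∉ PySem.Set.ofList p := fun hx => h ((PySem.Set.mem_ofList p x).mp hx)
    simp_all [PySem.Set.contains_eq_listContains]

theorem fmrGetDLast (y a b : String) (ys : List String) :
    ((y :: ys).getLast?).getD a = ((y :: ys).getLast?).getD b := by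
  cases h : (y :: ys).getLast? with
  | some z => rfl
  | none => simp at h

-- combined invariant: closed-state and open-state runs of A's loop equal B's run scan
theorem fmrMain (p : List String) :
    ∀ n (rest : List String), rest.length ≤ n →
      (∀ acc, fmrFinishA (rest.foldl (fmrStepA p) (acc, none))
        = acc ++ fmrGoB (PySem.Set.ofList p) rest)
      ∧ (∀ acc s e, fmrFinishA (rest.foldl (fmrStepA p) (acc, some (s, e)))
        = acc ++ ([("start", s), ("end", (rest.takeWhile (fun x => !decide (x ∈ p))).getLast?.getD e)]
            :: fmrGoB (PySem.Set.ofList p) (rest.dropWhile (fun x => !decide (x ∈ p))))) := by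
  intro n
  induction n with
  | zero =>
    intro rest h
    have : rest = [] := List.eq_nil_of_length_eq_zero (Nat.le_zero.mp h)
    subst this
    exact ⟨fun acc => by simp [fmrFinishA, fmrGoB],
           fun acc s e => by simp [fmrFinishA, fmrGoB]⟩
  | succ n ih =>
    intro rest h
    cases rest with
    | nil =>
      exact ⟨fun acc => by simp [fmrFinishA, fmrGoB],
             fun acc s e => by simp [fmrFinishA, fmrGoB]⟩
    | cons d t =>
      have ht : t.length ≤ n := by simpa using Nat.le_of_succ_le_succ h
      constructor
      · intro acc
        by_cases hc : d ∈ p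
        · have hstep : fmrStepA p (acc, none) d = (acc, none) := by
            simp [fmrStepA, hc]
          rw [List.foldl_cons, hstep, (ih t ht).1 acc, fmrGoB]
          simp [hc]
        · have hstep : fmrStepA p (acc, none) d = (acc, some (d, d)) := by
            simp [fmrStepA, hc]
          rw [List.foldl_cons, hstep, (ih t ht).2 acc d d, fmrGoB]
          simp only [fmrContainsOfList, fmrSpan, hc, decide_false, Bool.false_eq_true,
            if_false]
      · intro acc s e
        by_cases hc : d ∈ p
        · have hstep : fmrStepA p (acc, some (s, e)) d
              = (acc ++ [[("start", s), ("end", e)]], none) := by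
            simp [fmrStepA, hc]
          rw [List.foldl_cons, hstep, (ih t ht).1 (acc ++ [[("start", s), ("end", e)]])]
          have htw : (d :: t).takeWhile (fun x => !decide (x ∈ p)) = [] := by
            simp [hc]
          have hdw : (d :: t).dropWhile (fun x => !decide (x ∈ p)) = d :: t := by
            simp [hc]
          rw [htw, hdw, fmrGoB]
          simp [hc]
        · have hstep : fmrStepA p (acc, some (s, e)) d = (acc, some (s, d)) := by
            simp [fmrStepA, hc]
          rw [List.foldl_cons, hstep, (ih t ht).2 acc s d]
          have htw : (d :: t).takeWhile (fun x => !decide (x ∈ p))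
              = d :: t.takeWhile (fun x => !decide (x ∈ p)) := by
            simp [hc]
          have hdw : (d :: t).dropWhile (fun x => !decide (x ∈ p))
              = t.dropWhile (fun x => !decide (x ∈ p)) := by
            simp [hc]
          rw [htw, hdw]
          cases hq : t.takeWhile (fun x => !decide (x ∈ p)) with
          | nil => simp
          | cons y ys => rw [List.getLast?_cons_cons, fmrGetDLast y e d ys]

-- ===== VERDICT (by name: the statement is the Claim_ definition above) =====
theorem find_missing_ranges_spec : Claim_equal_find_missing_ranges := by
  intro p e _
  unfold Spec_find_missing_ranges find_missing_ranges find_missing_ranges_alt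
  simpa using (fmrMain p e.length e (le_refl _)).1 []
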